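-- pv_equiv track=rewrite | github.com/junmipark/Baekjoon | PJM/Python/Day 3/6-2. 셀프 넘버.py | generate
-- ===== SOURCE A (Python) =====
-- def generate(n) :
--     sum = 0;
--
--     sum += n;
--
--     while 1 :
--         if n//10 == 0 and n%10 == 0 :
--             break;
--
--         sum += n%10;
--         n = n//10;
--
--     return sum;
-- ===== SOURCE B (Python) =====
-- def generate(n):
--     return n + sum(int(c) for c in str(n))
-- ===== Notes on version B (the rewrite author's own statement) =====
-- stated objective: idiomatic
-- what changed: B computes the digit sum by mapping int over the characters of str(n) instead of A's while-loop peeling digits with %10 and //10 into an accumulator.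
import Mathlib
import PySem

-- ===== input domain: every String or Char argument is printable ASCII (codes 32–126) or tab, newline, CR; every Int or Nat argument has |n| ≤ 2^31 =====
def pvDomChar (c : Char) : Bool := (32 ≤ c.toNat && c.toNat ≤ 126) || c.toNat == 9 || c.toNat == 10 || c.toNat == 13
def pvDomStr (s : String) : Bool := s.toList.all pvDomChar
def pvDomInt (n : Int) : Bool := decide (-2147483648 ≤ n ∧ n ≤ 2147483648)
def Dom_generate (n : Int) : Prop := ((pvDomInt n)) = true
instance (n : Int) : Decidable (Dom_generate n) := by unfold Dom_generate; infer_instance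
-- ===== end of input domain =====

-- B replaces A's %10-//10 peeling loop with the idiomatic digit sum over the characters of str(n);
-- Pre_ excludes negative n, where A's while-loop never terminates.


-- ===== PORT A =====
-- A's `while 1` loop, with fuel making the recursion total; for n ≥ 0 the loop runs at most
-- n.natAbs times, so fuel n.natAbs + 1 is never exhausted on Pre_ (on negative n Python diverges).
def generateGo (fuel : Nat) (n sum : Int) : Int :=
  match fuel with
  | 0 => sum
  | f + 1 =>
    if PySem.Int.floordiv n 10 = 0 ∧ PySem.Int.mod n 10 = 0 then sum
    else generateGo f (PySem.Int.floordiv n 10) (sum + PySem.Int.mod n 10)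

def generate (n : Int) : Int := generateGo (n.natAbs + 1) n n

-- ===== PORT B =====
-- int(c) ported as ofChars? [c] (some, since str(n) of n ≥ 0 is all decimal digits)
def generate_alt (n : Int) : Int :=
  n + ((PySem.Int.toChars n).map (fun c => (PySem.Int.ofChars? [c]).getD 0)).sum

-- ===== PRECONDITION & SPEC =====
-- A's while-loop never terminates for negative n (n//10 stabilises at -1), so only n ≥ 0 is claimed.
def Pre_generate (n : Int) : Prop := 0 ≤ n
instance (n : Int) : Decidable (Pre_generate n) := by unfold Pre_generate; infer_instance
def pvWitness_generate : Int := (5)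

def Spec_generate (n : Int) (out : Int) : Prop := out = generate_alt n
instance (n : Int) (out : Int) : Decidable (Spec_generate n out) := by unfold Spec_generate; infer_instance

-- ===== CLAIM (what is proved, stated in full; the proofs are below) =====
def Claim_equal_generate : Prop := ∀ (n : Int), Dom_generate n → Pre_generate n → Spec_generate n (generate n)

-- ===== LEMMAS AND PROOFS =====

-- arithmetic digit sum of a natural number (reference value both ports are reduced to)
def dsumN : Nat → Int
  | 0 => 0
  | n + 1 => ((n + 1) % 10 : Nat) + dsumN ((n + 1) / 10)
decreasing_by exact Nat.div_lt_self (Nat.succ_pos n) (by omega)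

lemma dsumN_pos (n : Nat) (h : 0 < n) :
    dsumN n = ((n % 10 : Nat) : Int) + dsumN (n / 10) := by
  cases n with
  | zero => omega
  | succ m => rw [dsumN]

lemma dval_digitChar (d : Nat) (h : d < 10) :
    (PySem.Int.ofChars? [Nat.digitChar d]).getD 0 = (d : Int) := by
  interval_cases d <;> decide

lemma sum_toDigitsCore (fuel : Nat) :
    ∀ (n : Nat) (ds : List Char), n < fuel →
      ((Nat.toDigitsCore 10 fuel n ds).map
          (fun c => (PySem.Int.ofChars? [c]).getD 0)).sum
        = dsumN n + ((ds.map (fun c => (PySem.Int.ofChars? [c]).getD 0)).sum) := by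
  induction fuel with
  | zero => intro n ds h; omega
  | succ f ih =>
    intro n ds h
    simp only [Nat.toDigitsCore]
    by_cases h0 : n / 10 = 0
    · simp only [h0, if_true, List.map_cons, List.sum_cons]
      rw [dval_digitChar _ (Nat.mod_lt _ (by omega))]
      cases Nat.eq_zero_or_pos n with
      | inl hz => subst hz; simp [dsumN]
      | inr hp =>
        rw [dsumN_pos n hp, h0]
        simp [dsumN]
    · rw [if_neg h0]
      have hn : 0 < n := by
        rcases Nat.eq_zero_or_pos n with hz | hp
        · subst hz; simp at h0
        · exact hp
      rw [ih (n / 10) _ (by omega)]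
      simp only [List.map_cons, List.sum_cons]
      rw [dval_digitChar _ (Nat.mod_lt _ (by omega))]
      rw [dsumN_pos n hn]
      ring

-- B on a nonnegative input is n plus the arithmetic digit sum
lemma generate_alt_eq (m : Nat) : generate_alt (m : Int) = (m : Int) + dsumN m := by
  unfold generate_alt
  rw [show PySem.Int.toChars (m : Int) = Nat.toDigits 10 m by
        simp [PySem.Int.toChars]]
  rw [show Nat.toDigits 10 m = Nat.toDigitsCore 10 (m + 1) m [] from rfl]
  rw [sum_toDigitsCore (m + 1) m [] (by omega)]
  simp

-- A's loop on a nonnegative input with enough fuel accumulates the arithmetic digit sum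
lemma generateGo_eq (fuel : Nat) :
    ∀ (m : Nat) (s : Int), m < fuel → generateGo fuel (m : Int) s = s + dsumN m := by
  induction fuel with
  | zero => intro m s h; omega
  | succ f ih =>
    intro m s h
    simp only [generateGo]
    have h1 : PySem.Int.floordiv (m : Int) 10 = ((m / 10 : Nat) : Int) := by
      exact_mod_cast PySem.Int.floordiv_natCast m 10
    have h2 : PySem.Int.mod (m : Int) 10 = ((m % 10 : Nat) : Int) := by
      exact_mod_cast PySem.Int.mod_natCast m 10
    rw [h1, h2]
    by_cases hz : m = 0
    · subst hz; simp [dsumN]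
    · have h10 : ¬ (((m / 10 : Nat) : Int) = 0 ∧ ((m % 10 : Nat) : Int) = 0) := by
        intro ⟨h1, h2⟩
        have : m / 10 = 0 := by exact_mod_cast h1
        have : m % 10 = 0 := by exact_mod_cast h2
        omega
      rw [if_neg h10, ih (m / 10) _ (by omega)]
      rw [dsumN_pos m (by omega)]
      ring

-- ===== VERDICT (by name: the statement is the Claim_ definition above) =====
theorem generate_spec : Claim_equal_generate := by
  intro n _ hpre
  replace hpre : 0 ≤ n := hpre
  obtain ⟨m, rfl⟩ : ∃ m : Nat, n = (m : Int) := ⟨n.toNat, by omega⟩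
  unfold Spec_generate generate
  rw [generate_alt_eq, generateGo_eq _ m _ (by simp)]
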